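-- pv_equiv track=rewrite | github.com/ColeridgeGuo/leetcode | LC_1758/Minimum Changes To Make Alternating Binary String.py | minOperations_3
-- ===== SOURCE A (Python) =====
-- def minOperations_3(s: str) -> int:
--     # only mismatched 0's need to be counted because
--     # mismatched 1's will just be the complement wrt len(s)
--     start0 = 0
--     for i in range(len(s)):
--         if i % 2 == 0:
--             if s[i] == "1":
--                 start0 += 1
--         else:
--             if s[i] == "0":
--                 start0 += 1
--     return min(start0, len(s) - start0)
-- ===== SOURCE B (Python) =====
-- def minOperations_3(s: str) -> int:
--     # count mismatches against the pattern starting with '0' by index parity: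
--     # even positions should be '0' (so '1' is a change), odd positions should be '1'
--     start0 = s[::2].count("1") + s[1::2].count("0")
--     return min(start0, len(s) - start0)
-- ===== Notes on version B (the rewrite author's own statement) =====
-- stated objective: faster
-- what changed: Replaces the interpreted per-index loop with its i%2 branch by two stride-2 slices counted with str.count (even positions needing '0', odd positions needing '1').
import Mathlib
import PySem

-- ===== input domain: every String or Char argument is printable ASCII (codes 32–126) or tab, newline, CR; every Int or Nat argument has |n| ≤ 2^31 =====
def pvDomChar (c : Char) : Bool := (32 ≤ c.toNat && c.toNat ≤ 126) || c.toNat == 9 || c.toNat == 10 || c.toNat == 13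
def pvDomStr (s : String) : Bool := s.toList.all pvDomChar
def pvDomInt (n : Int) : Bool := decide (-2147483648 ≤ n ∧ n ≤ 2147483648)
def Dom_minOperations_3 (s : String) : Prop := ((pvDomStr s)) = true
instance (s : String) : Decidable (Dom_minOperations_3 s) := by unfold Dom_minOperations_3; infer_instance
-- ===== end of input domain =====

-- B replaces A's interpreted per-index loop (with its i%2 branch) by two stride-2
-- slices counted with str.count; same O(n) asymptotics, measurably faster constants.

-- ===== PORT A =====
def minOperations_3 (s : String) : Int :=
  let start0 : Int :=
    (PySem.List.pyRange 0 (PySem.Str.len s) 1).foldl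
      (fun start0 i =>
        if PySem.Int.mod i 2 = 0 then
          if PySem.Str.pyGet? s i = some '1' then start0 + 1 else start0
        else
          if PySem.Str.pyGet? s i = some '0' then start0 + 1 else start0)
      0
  min start0 (PySem.Str.len s - start0)

-- ===== PORT B =====
def minOperations_3_alt (s : String) : Int :=
  let start0 : Int :=
    (PySem.Str.count ((PySem.Str.slice? s none none 2).getD "") "1" : Int)
      + (PySem.Str.count ((PySem.Str.slice? s (some 1) none 2).getD "") "0" : Int)
  min start0 (PySem.Str.len s - start0)

-- ===== PRECONDITION & SPEC =====
def Spec_minOperations_3 (s : String) (out : Int) : Prop := out = minOperations_3_alt s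
instance (s : String) (out : Int) : Decidable (Spec_minOperations_3 s out) := by unfold Spec_minOperations_3; infer_instance

-- ===== CLAIM (what is proved, stated in full; the proofs are below) =====
def Claim_equal_minOperations_3 : Prop := ∀ (s : String), Dom_minOperations_3 s → Spec_minOperations_3 s (minOperations_3 s)


-- ===== LEMMAS AND PROOFS =====

-- the elements of l at even (b = true) resp. odd (b = false) indices
def pvSel (b : Bool) : List Char → List Char
  | [] => []
  | x :: r => if b then x :: pvSel false r else pvSel true r

-- mismatch count against the alternating pattern, b = "current position expects '0'"
def pvCnt (b : Bool) : List Char → Int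
  | [] => 0
  | x :: r =>
      if b then (if x = '1' then 1 else 0) + pvCnt false r
      else (if x = '0' then 1 else 0) + pvCnt true r

theorem pvCnt_eq_counts (l : List Char) :
    ∀ b : Bool, pvCnt b l
      = ((pvSel true l).count (if b then '1' else '0') : Int)
        + ((pvSel false l).count (if b then '0' else '1') : Int) := by
  induction l with
  | nil => intro b; simp [pvCnt, pvSel]
  | cons x r ih =>
      intro b
      cases b <;>
        simp [pvCnt, pvSel, ih true, ih false, List.count_cons] <;>
        split_ifs <;> ring

theorem pvCount_go_singleton (c : Char) :
    ∀ (l : List Char) (fuel acc : Nat), l.length ≤ fuel →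
      PySem.Chars.count.go [c] fuel l acc = acc + l.count c := by
  intro l
  induction l with
  | nil =>
      intro fuel acc _
      cases fuel <;> simp [PySem.Chars.count.go]
  | cons x r ih =>
      intro fuel acc hf
      cases fuel with
      | zero => simp at hf
      | succ f =>
          have hr : r.length ≤ f := by simpa using hf
          by_cases hx : c = x
          · subst hx
            simp [PySem.Chars.count.go, List.isPrefixOf, ih f (acc + 1) hr]
            omega
          · have hpre : ([c].isPrefixOf (x :: r)) = false := by
              simp [List.isPrefixOf]
              exact fun h => hx (by simpa using h)
            simp [PySem.Chars.count.go, hpre, ih f acc hr, Ne.symm hx]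

theorem pvCount_singleton (c : Char) (l : List Char) :
    PySem.Chars.count l [c] = l.count c := by
  simp [PySem.Chars.count, pvCount_go_singleton c l l.length 0 le_rfl]

-- the stride-2 index comprehensions inside slice? are pvSel
theorem pvFilterMap_sel : ∀ l : List Char,
    List.filterMap (fun x : Nat => l[(2 * (x : Int)).toNat]?)
        (List.range ((l.length + 1) / 2)) = pvSel true l
      ∧ List.filterMap (fun x : Nat => l[(1 + 2 * (x : Int)).toNat]?)
        (List.range (l.length / 2)) = pvSel false l := by
  intro l
  induction l with
  | nil => simp [pvSel]
  | cons a r ih =>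
      constructor
      · have hc : ((a :: r).length + 1) / 2 = r.length / 2 + 1 := by
          simp only [List.length_cons]; omega
        rw [hc, List.range_succ_eq_map, List.filterMap_cons, List.filterMap_map]
        have hfun : ((fun x : Nat => (a :: r)[(2 * (x : Int)).toNat]?) ∘ Nat.succ)
            = fun x : Nat => r[(1 + 2 * (x : Int)).toNat]? := by
          funext x
          have h1 : ((2 : Int) * ((Nat.succ x : Nat) : Int)).toNat = (2 * x + 1) + 1 := by
            omega
          have h2 : ((1 : Int) + 2 * ((x : Nat) : Int)).toNat = 2 * x + 1 := by
            omega
          simp only [Function.comp, h1, h2, List.getElem?_cons_succ]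
        rw [hfun, ih.2]
        simp [pvSel]
      · have hc : (a :: r).length / 2 = (r.length + 1) / 2 := by
          simp only [List.length_cons]
        rw [hc]
        have hfun : (fun x : Nat => (a :: r)[(1 + 2 * (x : Int)).toNat]?)
            = fun x : Nat => r[(2 * (x : Int)).toNat]? := by
          funext x
          have h1 : ((1 : Int) + 2 * ((x : Nat) : Int)).toNat = 2 * x + 1 := by
            omega
          have h2 : ((2 : Int) * ((x : Nat) : Int)).toNat = 2 * x := by
            omega
          simp only [h1, h2, List.getElem?_cons_succ]
        rw [hfun, ih.1]
        simp [pvSel]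

theorem pvSlice2_even (l : List Char) :
    PySem.List.slice? l none none 2 = some (pvSel true l) := by
  cases l with
  | nil => decide
  | cons a r =>
      simp only [PySem.List.slice?, PySem.List.sliceIndices]
      norm_num
      have hc : (((r.length : Int) + 1 + 2 - 1) / 2).toNat = ((a :: r).length + 1) / 2 := by
        simp only [List.length_cons]; omega
      rw [hc]
      exact (pvFilterMap_sel (a :: r)).1

theorem pvSlice2_odd (l : List Char) :
    PySem.List.slice? l (some 1) none 2 = some (pvSel false l) := by
  cases l with
  | nil => decide
  | cons a r =>
      simp only [PySem.List.slice?, PySem.List.sliceIndices]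
      norm_num
      have hc : (if 0 < r.length then (((r.length : Int) + 2 - 1) / 2).toNat else 0)
          = (a :: r).length / 2 := by
        simp only [List.length_cons]; split_ifs <;> omega
      rw [hc]
      exact (pvFilterMap_sel (a :: r)).2

-- the loop body of A, on (index, char) pairs
def pvF : Int → (Int × Char) → Int := fun a p =>
  if PySem.Int.mod p.1 2 = 0 then (if p.2 = '1' then a + 1 else a)
  else (if p.2 = '0' then a + 1 else a)

theorem pvLoop_enum (l : List Char) :
    ∀ (k acc : Int), 0 ≤ k →
      (PySem.List.enumerate l k).foldl pvF acc
        = acc + (if PySem.Int.mod k 2 = 0 then pvCnt true l else pvCnt false l) := by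
  induction l with
  | nil => intro k acc _; simp [PySem.List.enumerate_nil, pvCnt]
  | cons x r ih =>
      intro k acc hk
      rw [PySem.List.enumerate_cons, List.foldl_cons,
        ih (k + 1) (pvF acc (k, x)) (by omega)]
      have hm : PySem.Int.mod k 2 = k % 2 := PySem.Int.mod_eq_emod_of_pos (by omega)
      have hm1 : PySem.Int.mod (k + 1) 2 = (k + 1) % 2 := PySem.Int.mod_eq_emod_of_pos (by omega)
      by_cases h : k % 2 = 0
      · have h1 : (k + 1) % 2 ≠ 0 := by omega
        simp [pvF, h, h1, pvCnt]
        split_ifs <;> ring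
      · have h1 : (k + 1) % 2 = 0 := by omega
        simp [pvF, h, h1, pvCnt]
        split_ifs <;> ring

theorem pvLoopA (l : List Char) :
    (PySem.List.pyRange 0 (l.length : Int) 1).foldl
        (fun start0 i =>
          if PySem.Int.mod i 2 = 0 then
            if PySem.List.pyGet? l i = some '1' then start0 + 1 else start0
          else
            if PySem.List.pyGet? l i = some '0' then start0 + 1 else start0)
        0
      = pvCnt true l := by
  have hcongr : (PySem.List.pyRange 0 (l.length : Int) 1).foldl
        (fun start0 i =>
          if PySem.Int.mod i 2 = 0 then
            if PySem.List.pyGet? l i = some '1' then start0 + 1 else start0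
          else
            if PySem.List.pyGet? l i = some '0' then start0 + 1 else start0)
        0
      = (PySem.List.pyRange 0 (l.length : Int) 1).foldl
        (fun start0 i => pvF start0 (i, PySem.List.pyGetD l i 'x')) 0 := by
    apply PySem.List.foldl_congr_mem
    intro acc i hi
    have hmem := (PySem.List.mem_pyRange_one).1 hi
    have h0 : 0 ≤ i := hmem.1
    have h1 : i < (l.length : Int) := hmem.2
    have hg : PySem.List.pyGet? l i = some l[i.toNat] :=
      PySem.List.pyGet?_eq_some_getElem l h0 (by simpa using h1)
    have hgd : PySem.List.pyGetD l i 'x' = l[i.toNat] := by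
      simp [PySem.List.pyGetD, hg]
    simp [pvF, hg, hgd]
  rw [hcongr]
  have hfold : (PySem.List.enumerate l 0).foldl pvF 0
      = (PySem.List.pyRange 0 (PySem.List.len l) 1).foldl
          (fun acc j => pvF acc (j, PySem.List.pyGetD l j 'x')) 0 := by
    rw [PySem.List.enumerate_eq_map_pyRange l 'x', List.foldl_map]
  have hlen : PySem.List.len l = (l.length : Int) := by simp [PySem.List.len]
  rw [hlen] at hfold
  rw [← hfold, pvLoop_enum l 0 0 le_rfl]
  simp

-- ===== VERDICT (by name: the statement is the Claim_ definition above) =====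
theorem minOperations_3_spec : Claim_equal_minOperations_3 := by
  intro s _
  unfold Spec_minOperations_3 minOperations_3 minOperations_3_alt
  have hget : ∀ i, PySem.Str.pyGet? s i = PySem.List.pyGet? s.toList i := by
    intro i; simp [PySem.Str.pyGet?]
  have hlen : PySem.Str.len s = (s.toList.length : Int) := by
    simp [PySem.Str.len]
  have hA : (PySem.List.pyRange 0 (PySem.Str.len s) 1).foldl
      (fun start0 i =>
        if PySem.Int.mod i 2 = 0 then
          if PySem.Str.pyGet? s i = some '1' then start0 + 1 else start0
        else
          if PySem.Str.pyGet? s i = some '0' then start0 + 1 else start0)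
      0 = pvCnt true s.toList := by
    rw [hlen]
    simp only [hget]
    exact pvLoopA s.toList
  have hev : PySem.Str.slice? s none none 2
      = some (String.ofList (pvSel true s.toList)) := by
    simp [PySem.Str.slice?, PySem.Chars.slice?_eq_listSlice?, pvSlice2_even]
  have hod : PySem.Str.slice? s (some 1) none 2
      = some (String.ofList (pvSel false s.toList)) := by
    simp [PySem.Str.slice?, PySem.Chars.slice?_eq_listSlice?, pvSlice2_odd]
  have hB : (PySem.Str.count ((PySem.Str.slice? s none none 2).getD "") "1" : Int)
      + (PySem.Str.count ((PySem.Str.slice? s (some 1) none 2).getD "") "0" : Int)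
      = pvCnt true s.toList := by
    rw [hev, hod]
    simp only [Option.getD_some, PySem.Str.count]
    rw [show (String.ofList (pvSel true s.toList)).toList = pvSel true s.toList by simp]
    rw [show (String.ofList (pvSel false s.toList)).toList = pvSel false s.toList by simp]
    rw [show "1".toList = ['1'] from rfl, show "0".toList = ['0'] from rfl]
    rw [pvCount_singleton, pvCount_singleton, pvCnt_eq_counts s.toList true]
    simp
  simp only [hA, hB]
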